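-- pv_equiv track=rewrite | github.com/Akthar24/AI-Education-Mentor | bot.py | split_concatenated_words
-- ===== SOURCE A (Python) =====
-- def split_concatenated_words(input_str, words):
--     split_result = []
--     current_str = input_str.lower()
--
--     while current_str:
--         found = False
--         for word in sorted(words, key=len, reverse=True):
--             if current_str.startswith(word):
--                 split_result.append(word)
--                 current_str = current_str[len(word):]
--                 found = True
--                 break
--         if not found:
--             split_result.append(current_str)
--             break
--     return split_result
-- ===== SOURCE B (Python) =====
-- def split_concatenated_words(input_str, words):
--     # Build a trie over `words`, keyed by path string: every nonempty prefix of a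
--     # word (and the root "") gets a node; a node stores the word ending there, else None.
--     nodes = {"": None}
--     for w in words:
--         p = ""
--         for ch in w:
--             p += ch
--             nodes.setdefault(p, None)
--         nodes[w] = w
--     s = input_str.lower()
--     out = []
--     pos = 0
--     while pos < len(s):
--         # descend the trie from the current position, remembering the deepest word-ending
--         best = nodes[""]
--         path = ""
--         for ch in s[pos:]:
--             path += ch
--             if path not in nodes:
--                 break
--             v = nodes[path]
--             if v is not None:
--                 best = v
--         if best is None:
--             out.append(s[pos:])
--             break
--         out.append(best)
--         pos += len(best)
--     return out
-- ===== Notes on version B (the rewrite author's own statement) =====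
-- stated objective: faster
-- what changed: B builds a trie over the words once (every word prefix a node, word endings stored) and finds each piece by a single character-by-character descent that remembers the deepest word-ending, instead of A re-sorting the whole word list by length and substring-testing every word at every position.
import Mathlib
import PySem

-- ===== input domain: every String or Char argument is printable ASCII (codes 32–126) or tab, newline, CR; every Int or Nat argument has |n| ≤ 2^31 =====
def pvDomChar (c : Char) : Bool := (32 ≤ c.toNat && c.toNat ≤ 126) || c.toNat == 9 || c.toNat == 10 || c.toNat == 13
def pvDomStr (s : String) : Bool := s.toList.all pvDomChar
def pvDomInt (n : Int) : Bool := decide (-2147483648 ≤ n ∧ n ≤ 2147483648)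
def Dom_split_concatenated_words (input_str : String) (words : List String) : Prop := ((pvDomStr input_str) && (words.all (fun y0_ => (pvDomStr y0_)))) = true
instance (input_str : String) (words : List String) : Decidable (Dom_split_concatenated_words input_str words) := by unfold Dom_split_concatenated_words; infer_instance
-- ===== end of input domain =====

-- B replaces A's per-iteration re-sort-and-scan of the word list by a trie built once over
-- `words` (nodes keyed by their path, each nonempty word-prefix a node, word endings stored);
-- each piece is found by a single character-by-character descent remembering the deepest
-- word-ending.  The return value is identical wherever A terminates; when "" ∈ words and a
-- position matches no nonempty word both programs loop forever in the same way, and the two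
-- fuel recursions of the ports agree step for step at every fuel, so the ports agree everywhere.

-- ===== PORT A =====
-- while-loop of A as fuel recursion; fuel = |input|+1 covers every terminating run (every
-- iteration consumes ≥ 1 character or breaks).  current_str[len(word):] is List.drop;
-- sorted(words, key=len, reverse=True) is PySem.List.sorted with key = character count.
def pvGoA : Nat → List Char → List String → List String → List String
  | 0, _, _, acc => acc
  | fuel+1, cur, words, acc =>
    if cur = [] then acc
    else
      match (PySem.List.sorted words (fun w => w.toList.length) true).find?
              (fun w => PySem.Chars.startswith cur w.toList) with
      | some w => pvGoA fuel (cur.drop w.toList.length) words (acc ++ [w])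
      | none => acc ++ [String.ofList cur]

def split_concatenated_words (input_str : String) (words : List String) : List String :=
  pvGoA (input_str.toList.length + 1) (PySem.Str.lower input_str).toList words []

-- ===== PORT B =====
-- trie build: nodes = {"": None}; for each word, p grows char by char with
-- nodes.setdefault(p, None), then nodes[w] = w.  Keys are path strings, ported as List Char.
def pvTrie (words : List String) : PySem.Dict (List Char) (Option String) :=
  words.foldl
    (fun d w =>
      ((w.toList.foldl
          (fun (st : PySem.Dict (List Char) (Option String) × List Char) ch =>
            (PySem.Dict.setdefault st.1 (st.2 ++ [ch]) none, st.2 ++ [ch]))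
          (d, ([] : List Char))).1).insert w.toList (some w))
    ((PySem.Dict.empty).insert ([] : List Char) none)

-- descent: for ch in remainder: path += ch; break if path not a trie key; else remember
-- the word ending at path (if any) as best.
def pvDescend (d : PySem.Dict (List Char) (Option String)) : List Char → List Char → Option String → Option String
  | [], _, best => best
  | c :: rest, path, best =>
    match d.get? (path ++ [c]) with
    | none => best
    | some v =>
      pvDescend d rest (path ++ [c]) (match v with | some w => some w | none => best)

-- outer while-loop; best starts from nodes[""] (the root always exists: getD is exact here).
def pvGoB : Nat → List Char → PySem.Dict (List Char) (Option String) → List String → List String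
  | 0, _, _, acc => acc
  | fuel+1, cur, d, acc =>
    if cur = [] then acc
    else
      match pvDescend d cur [] (d.getD [] none) with
      | none => acc ++ [String.ofList cur]
      | some w => pvGoB fuel (cur.drop w.toList.length) d (acc ++ [w])

def split_concatenated_words_alt (input_str : String) (words : List String) : List String :=
  pvGoB (input_str.toList.length + 1) (PySem.Str.lower input_str).toList (pvTrie words) []

-- ===== PRECONDITION & SPEC =====
def Spec_split_concatenated_words (input_str : String) (words : List String) (out : List String) : Prop := out = split_concatenated_words_alt input_str words
instance (input_str : String) (words : List String) (out : List String) : Decidable (Spec_split_concatenated_words input_str words out) := by unfold Spec_split_concatenated_words; infer_instance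

-- ===== CLAIM (what is proved, stated in full; the proofs are below) =====
def Claim_equal_split_concatenated_words : Prop := ∀ (input_str : String) (words : List String), Dom_split_concatenated_words input_str words → Spec_split_concatenated_words input_str words (split_concatenated_words input_str words)

-- ===== LEMMAS AND PROOFS =====

-- proof-side: the best (longest) word among prefixes of cur of length ≤ k
def pvBestUpTo (words : List String) (cur : List Char) : Nat → Option String
  | 0 => if String.ofList (cur.take 0) ∈ words then some (String.ofList (cur.take 0)) else none
  | k+1 => if String.ofList (cur.take (k+1)) ∈ words then some (String.ofList (cur.take (k+1))) else pvBestUpTo words cur k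

-- first match in a list whose key is nonincreasing is a maximal match
theorem pv_find?_desc_max {α : Type} (key : α → Nat) {p : α → Bool} {l : List α} {a : α}
    (hp : l.Pairwise (fun x y => key y ≤ key x)) (h : l.find? p = some a) :
    p a = true ∧ a ∈ l ∧ ∀ b ∈ l, p b = true → key b ≤ key a := by
  induction l with
  | nil => simp at h
  | cons x t ih =>
    rcases List.pairwise_cons.mp hp with ⟨hx, ht⟩
    by_cases hpx : p x = true
    · rw [List.find?_cons_of_pos hpx] at h
      cases h
      refine ⟨hpx, List.mem_cons_self, ?_⟩
      intro b hb _
      rcases List.mem_cons.mp hb with rfl | hb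
      · exact le_refl _
      · exact hx b hb
    · rw [List.find?_cons_of_neg hpx] at h
      obtain ⟨hpa, hmem, hmax⟩ := ih ht h
      refine ⟨hpa, List.mem_cons_of_mem _ hmem, ?_⟩
      intro b hb hpb
      rcases List.mem_cons.mp hb with rfl | hb
      · exact absurd hpb hpx
      · exact hmax b hb hpb

-- the inner setdefault loop: adds exactly the nonempty extensions of pref along l, value none
theorem pv_setdefault_loop : ∀ (l : List Char) (d : PySem.Dict (List Char) (Option String)) (pref : List Char),
    (l.foldl (fun (st : PySem.Dict (List Char) (Option String) × List Char) ch =>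
        (PySem.Dict.setdefault st.1 (st.2 ++ [ch]) none, st.2 ++ [ch])) (d, pref)).2 = pref ++ l ∧
    ∀ p, (l.foldl (fun (st : PySem.Dict (List Char) (Option String) × List Char) ch =>
        (PySem.Dict.setdefault st.1 (st.2 ++ [ch]) none, st.2 ++ [ch])) (d, pref)).1.get? p =
      if (d.get? p).isSome then d.get? p
      else if pref <+: p ∧ p ≠ pref ∧ p <+: pref ++ l then some none
      else none := by
  intro l
  induction l with
  | nil =>
    intro d pref
    refine ⟨by simp, ?_⟩
    intro p
    cases hd : d.get? p with
    | some v => simp [hd]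
    | none =>
      simp only [List.foldl_nil, hd, Option.isSome_none, Bool.false_eq_true, if_false]
      rw [if_neg]
      rintro ⟨h1, h2, h3⟩
      rw [List.append_nil] at h3
      exact h2 (h3.eq_of_length (le_antisymm h3.length_le h1.length_le))
  | cons ch l ih =>
    intro d pref
    obtain ⟨hsnd, hget⟩ := ih (d.setdefault (pref ++ [ch]) none) (pref ++ [ch])
    constructor
    · rw [List.foldl_cons, hsnd]; simp
    · intro p
      rw [List.foldl_cons, hget p]
      by_cases hp : p = pref ++ [ch]
      · subst hp
        rw [PySem.Dict.get?_setdefault_self]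
        cases hd : d.get? (pref ++ [ch]) with
        | some v => simp
        | none =>
          simp only [Option.getD_none, Option.isSome_some, if_true,
            Option.isSome_none, Bool.false_eq_true, if_false]
          rw [if_pos]
          exact ⟨List.prefix_append pref [ch], fun h => (by simp : pref ≠ pref ++ [ch]) h.symm,
            by rw [show pref ++ ch :: l = (pref ++ [ch]) ++ l by simp]; exact List.prefix_append _ _⟩
      · rw [PySem.Dict.get?_setdefault_of_ne d none hp]
        cases hd : d.get? p with
        | some v => simp
        | none =>
          simp only [Option.isSome_none, Bool.false_eq_true, if_false]
          have hcond : (pref ++ [ch] <+: p ∧ p ≠ pref ++ [ch] ∧ p <+: pref ++ [ch] ++ l) ↔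
              (pref <+: p ∧ p ≠ pref ∧ p <+: pref ++ ch :: l) := by
            constructor
            · rintro ⟨h1, h2, h3⟩
              refine ⟨(List.prefix_append pref [ch]).trans h1, ?_, by simpa using h3⟩
              intro hpp
              have := h1.length_le
              rw [hpp] at this
              simp at this
            · rintro ⟨h1, h2, h3⟩
              obtain ⟨q, rfl⟩ := h1
              have hq : q <+: ch :: l := (List.prefix_append_right_inj pref).mp h3
              cases q with
              | nil => exact absurd (List.append_nil pref) h2
              | cons a q' =>
                obtain ⟨rfl, hq2⟩ := List.cons_prefix_cons.mp hq
                refine ⟨?_, hp, ?_⟩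
                · rw [show pref ++ [a] = pref ++ [a] ++ ([] : List Char) by simp]
                  rw [show pref ++ a :: q' = pref ++ [a] ++ q' by simp]
                  exact (List.prefix_append_right_inj _).mpr (List.nil_prefix)
                · rw [show pref ++ a :: q' = pref ++ [a] ++ q' by simp]
                  exact (List.prefix_append_right_inj _).mpr hq2
          by_cases hc : pref ++ [ch] <+: p ∧ p ≠ pref ++ [ch] ∧ p <+: pref ++ [ch] ++ l
          · rw [if_pos hc, if_pos (hcond.mp hc)]
          · rw [if_neg hc, if_neg (fun h => hc (hcond.mpr h))]

-- the outer fold over the words, relative to an arbitrary accumulator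
theorem pv_trie_fold : ∀ (ws : List String) (d : PySem.Dict (List Char) (Option String)) (p : List Char),
    (ws.foldl
      (fun d w =>
        ((w.toList.foldl
            (fun (st : PySem.Dict (List Char) (Option String) × List Char) ch =>
              (PySem.Dict.setdefault st.1 (st.2 ++ [ch]) none, st.2 ++ [ch]))
            (d, ([] : List Char))).1).insert w.toList (some w))
      d).get? p =
      if String.ofList p ∈ ws then some (some (String.ofList p))
      else if (d.get? p).isSome then d.get? p
      else if ∃ w ∈ ws, p ≠ [] ∧ p <+: w.toList then some none
      else none := by
  intro ws
  induction ws with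
  | nil =>
    intro d p
    simp only [List.foldl_nil, List.not_mem_nil, if_false]
    cases hd : d.get? p with
    | some v => simp
    | none => simp
  | cons w ws ih =>
    intro d p
    rw [List.foldl_cons, ih]
    have hinner := (pv_setdefault_loop w.toList d []).2 p
    simp only [List.nil_append, List.nil_prefix, true_and] at hinner
    rw [PySem.Dict.get?_insert]
    by_cases h1 : String.ofList p ∈ ws
    · rw [if_pos h1, if_pos (List.mem_cons_of_mem _ h1)]
    · rw [if_neg h1]
      by_cases h2 : p = w.toList
      · subst h2
        rw [if_pos rfl]
        simp only [Option.isSome_some, if_true]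
        rw [if_pos (by rw [String.ofList_toList]; exact List.mem_cons_self)]
        rw [String.ofList_toList]
      · rw [if_neg h2, hinner]
        have hmem : String.ofList p ∉ w :: ws := by
          intro hm
          rcases List.mem_cons.mp hm with he | hm'
          · exact h2 (by rw [← he, String.toList_ofList])
          · exact h1 hm'
        rw [if_neg hmem]
        cases hd : d.get? p with
        | some v => simp
        | none =>
          simp only [Option.isSome_none, Bool.false_eq_true, if_false]
          by_cases h4 : p ≠ [] ∧ p <+: w.toList
          · rw [if_pos h4]
            simp only [Option.isSome_some, if_true]
            rw [if_pos ⟨w, List.mem_cons_self, h4⟩]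
          · rw [if_neg h4]
            simp only [Option.isSome_none, Bool.false_eq_true, if_false]
            by_cases h5 : ∃ w' ∈ ws, p ≠ [] ∧ p <+: w'.toList
            · obtain ⟨w', hw', hc⟩ := h5
              rw [if_pos ⟨w', hw', hc⟩, if_pos ⟨w', List.mem_cons_of_mem _ hw', hc⟩]
            · rw [if_neg h5, if_neg]
              rintro ⟨w', hw', hc⟩
              rcases List.mem_cons.mp hw' with rfl | hw''
              · exact h4 hc
              · exact h5 ⟨w', hw'', hc⟩

-- full trie characterization
theorem pv_trie_get (words : List String) (p : List Char) :
    (pvTrie words).get? p =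
      if String.ofList p ∈ words then some (some (String.ofList p))
      else if p = [] then some none
      else if ∃ w ∈ words, p <+: w.toList then some none
      else none := by
  unfold pvTrie
  rw [pv_trie_fold]
  rw [PySem.Dict.get?_insert]
  by_cases h1 : String.ofList p ∈ words
  · rw [if_pos h1, if_pos h1]
  · rw [if_neg h1, if_neg h1]
    by_cases h2 : p = []
    · rw [if_pos h2, if_pos h2]
      simp
    · simp only [if_neg h2]
      have hbase : ((PySem.Dict.empty : PySem.Dict (List Char) (Option String)).get? p) = none := by
        simp [PySem.Dict.get?_empty]
      simp only [hbase, Option.isSome_none, Bool.false_eq_true, if_false]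
      by_cases h5 : ∃ w ∈ words, p <+: w.toList
      · obtain ⟨w, hw, hc⟩ := h5
        rw [if_pos ⟨w, hw, h2, hc⟩, if_pos ⟨w, hw, hc⟩]
      · rw [if_neg (fun h => h5 (by obtain ⟨w, hw, _, hc⟩ := h; exact ⟨w, hw, hc⟩)), if_neg h5]

theorem pv_bestUpTo_stable (words : List String) (cur : List Char) (k : Nat) :
    ∀ m, (∀ L, k < L → L ≤ k + m → String.ofList (cur.take L) ∉ words) →
      pvBestUpTo words cur (k + m) = pvBestUpTo words cur k := by
  intro m
  induction m with
  | zero => intro _; rfl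
  | succ m ih =>
    intro h
    have : k + (m + 1) = (k + m) + 1 := by omega
    rw [this]
    show (if String.ofList (cur.take (k+m+1)) ∈ words then _ else pvBestUpTo words cur (k+m)) = _
    rw [if_neg (h (k+m+1) (by omega) (by omega))]
    exact ih (fun L h1 h2 => h L h1 (by omega))

theorem pv_bestUpTo_hit (words : List String) (cur : List Char) (k : Nat)
    (h : String.ofList (cur.take k) ∈ words) :
    pvBestUpTo words cur k = some (String.ofList (cur.take k)) := by
  cases k with
  | zero => simp only [pvBestUpTo]; rw [if_pos h]
  | succ k => simp only [pvBestUpTo]; rw [if_pos h]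

-- the root's stored value is pvBestUpTo 0
theorem pv_root (words : List String) (cur : List Char) :
    (pvTrie words).getD [] none = pvBestUpTo words cur 0 := by
  rw [PySem.Dict.getD_eq_get?_getD, pv_trie_get]
  by_cases h : String.ofList ([] : List Char) ∈ words
  · simp [pvBestUpTo, h]
  · simp [pvBestUpTo, h]

-- the descent computes the longest word-prefix of cur0
theorem pv_descend_eq (words : List String) (cur0 : List Char) :
    ∀ (rest : List Char) (k : Nat), k + rest.length = cur0.length → cur0.drop k = rest →
      pvDescend (pvTrie words) rest (cur0.take k) (pvBestUpTo words cur0 k) =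
        pvBestUpTo words cur0 cur0.length := by
  intro rest
  induction rest with
  | nil =>
    intro k hk _
    have hke : k = cur0.length := by simpa using hk
    simp only [pvDescend]
    rw [hke]
  | cons c rest' ih =>
    intro k hk hdrop
    have hk' : k < cur0.length := by simp at hk; omega
    have hget : cur0[k]? = some c := by
      have := congrArg (fun t => t[0]?) hdrop
      simpa using this
    have htk : cur0.take (k+1) = cur0.take k ++ [c] := by
      rw [List.take_add_one, hget]; rfl
    have hdrop' : cur0.drop (k+1) = rest' := by
      have := congrArg (List.drop 1) hdrop
      simpa [List.drop_drop] using this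
    have hne : cur0.take (k+1) ≠ [] := by
      have hl : (cur0.take (k+1)).length = k+1 := List.length_take_of_le (by omega)
      intro h0; rw [h0] at hl; simp at hl
    simp only [pvDescend]
    rw [← htk]
    cases hv : (pvTrie words).get? (cur0.take (k+1)) with
    | none =>
      rw [pv_trie_get] at hv
      have hmem' : String.ofList (cur0.take (k+1)) ∉ words := by
        intro hm; rw [if_pos hm] at hv; cases hv
      have h3 : ¬ ∃ w ∈ words, cur0.take (k+1) <+: w.toList := by
        intro hex
        rw [if_neg hmem', if_neg hne, if_pos hex] at hv
        cases hv
      have hno : ∀ L, k < L → L ≤ cur0.length → String.ofList (cur0.take L) ∉ words := by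
        intro L hL1 hL2 hmem
        apply h3
        refine ⟨String.ofList (cur0.take L), hmem, ?_⟩
        rw [String.toList_ofList]
        exact List.take_prefix_take_left (by omega)
      have hstab := pv_bestUpTo_stable words cur0 k (cur0.length - k) (fun L a b => hno L a (by omega))
      rw [show k + (cur0.length - k) = cur0.length by omega] at hstab
      exact hstab.symm
    | some v =>
      rw [pv_trie_get] at hv
      dsimp only
      have hrec := ih (k+1) (by simp at hk ⊢; omega) hdrop'
      cases v with
      | some w' =>
        dsimp only
        have hw : some w' = pvBestUpTo words cur0 (k+1) := by
          by_cases hmem : String.ofList (cur0.take (k+1)) ∈ words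
          · rw [if_pos hmem] at hv
            have hw' : String.ofList (cur0.take (k+1)) = w' :=
              Option.some.inj (Option.some.inj hv)
            simp only [pvBestUpTo]
            rw [if_pos hmem, hw']
          · rw [if_neg hmem, if_neg hne] at hv
            by_cases hex : ∃ w ∈ words, cur0.take (k+1) <+: w.toList
            · rw [if_pos hex] at hv
              exact absurd (Option.some.inj hv) (by simp)
            · rw [if_neg hex] at hv; cases hv
        rw [hw]
        exact hrec
      | none =>
        dsimp only
        have hw : pvBestUpTo words cur0 k = pvBestUpTo words cur0 (k+1) := by
          by_cases hmem : String.ofList (cur0.take (k+1)) ∈ words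
          · rw [if_pos hmem] at hv
            exact absurd (Option.some.inj hv) (by simp)
          · simp only [pvBestUpTo]
            rw [if_neg hmem]
        rw [hw]
        exact hrec

-- A's step characterized by pvBestUpTo
theorem pv_stepA_some (words : List String) (cur : List Char) (w : String)
    (hA : (PySem.List.sorted words (fun w => w.toList.length) true).find?
            (fun w => PySem.Chars.startswith cur w.toList) = some w) :
    pvBestUpTo words cur cur.length = some w := by
  obtain ⟨hpw, hmemw, hmax⟩ := pv_find?_desc_max (fun w => w.toList.length)
    (PySem.List.sorted_pairwise_rev words (fun w => w.toList.length)) hA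
  have hpre : w.toList <+: cur := (PySem.Chars.startswith_iff cur w.toList).mp hpw
  have hmemw' : w ∈ words := (PySem.List.mem_sorted _ _ _ _).mp hmemw
  have htake : cur.take w.toList.length = w.toList := (List.prefix_iff_eq_take.mp hpre).symm
  have hLw : w.toList.length ≤ cur.length := hpre.length_le
  have hmemTake : String.ofList (cur.take w.toList.length) ∈ words := by
    rw [htake, String.ofList_toList]; exact hmemw'
  have hno : ∀ L, w.toList.length < L → L ≤ cur.length → String.ofList (cur.take L) ∉ words := by
    intro L h1 h2 hmem
    have hsw : PySem.Chars.startswith cur (String.ofList (cur.take L)).toList = true := by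
      rw [String.toList_ofList]
      exact (PySem.Chars.startswith_iff _ _).mpr (List.take_prefix _ _)
    have hle := hmax _ ((PySem.List.mem_sorted _ _ _ _).mpr hmem) hsw
    simp only [String.toList_ofList] at hle
    rw [List.length_take_of_le h2] at hle
    omega
  have hstab := pv_bestUpTo_stable words cur w.toList.length (cur.length - w.toList.length)
    (fun L a b => hno L a (by omega))
  rw [show w.toList.length + (cur.length - w.toList.length) = cur.length by omega] at hstab
  rw [hstab, pv_bestUpTo_hit words cur w.toList.length hmemTake, htake, String.ofList_toList]

theorem pv_stepA_none (words : List String) (cur : List Char)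
    (hA : (PySem.List.sorted words (fun w => w.toList.length) true).find?
            (fun w => PySem.Chars.startswith cur w.toList) = none) :
    pvBestUpTo words cur cur.length = none := by
  have hno : ∀ L, L ≤ cur.length → String.ofList (cur.take L) ∉ words := by
    intro L hL hmem
    have hfind := List.find?_eq_none.mp hA (String.ofList (cur.take L))
      ((PySem.List.mem_sorted _ _ _ _).mpr hmem)
    apply hfind
    rw [String.toList_ofList]
    exact (PySem.Chars.startswith_iff _ _).mpr (List.take_prefix _ _)
  have hstab := pv_bestUpTo_stable words cur 0 cur.length (fun L a b => hno L (by omega))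
  rw [Nat.zero_add] at hstab
  rw [hstab]
  simp only [pvBestUpTo]
  rw [if_neg (hno 0 (by omega))]

theorem pv_go_eq (words : List String) (fuel : Nat) (cur : List Char) (acc : List String) :
    pvGoA fuel cur words acc = pvGoB fuel cur (pvTrie words) acc := by
  induction fuel generalizing cur acc with
  | zero => rfl
  | succ fuel ih =>
    simp only [pvGoA, pvGoB]
    by_cases hc : cur = []
    · rw [if_pos hc, if_pos hc]
    · rw [if_neg hc, if_neg hc]
      have hdesc : pvDescend (pvTrie words) cur [] ((pvTrie words).getD [] none) =
          pvBestUpTo words cur cur.length := by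
        rw [pv_root words cur]
        have := pv_descend_eq words cur cur 0 (by omega) (by simp)
        simpa using this
      rcases hfa : (PySem.List.sorted words (fun w => w.toList.length) true).find?
        (fun w => PySem.Chars.startswith cur w.toList) with _ | w
      · rw [hfa, hdesc, pv_stepA_none words cur hfa]
      · rw [hfa, hdesc, pv_stepA_some words cur w hfa]
        exact ih _ _

-- ===== VERDICT (by name: the statement is the Claim_ definition above) =====
theorem split_concatenated_words_spec : Claim_equal_split_concatenated_words := by
  intro input_str words _
  unfold Spec_split_concatenated_words split_concatenated_words split_concatenated_words_alt
  exact pv_go_eq words _ _ _
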